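-- pv_equiv track=rewrite | github.com/dx19910707/LeetCode | 693(交替位二进制数).py | hasAlternatingBits2
-- ===== SOURCE A (Python) =====
-- def hasAlternatingBits2(n):
--     tmp = n & 1
--     while n:
--         tmp_1 = (n >> 1) & 1
--         if tmp == tmp_1:
--             return False
--         tmp = tmp_1
--         n = n >> 1
--     return True
-- ===== SOURCE B (Python) =====
-- def hasAlternatingBits2(n):
--     m = n ^ (n >> 1)
--     return m & (m + 1) == 0
-- ===== Notes on version B (the rewrite author's own statement) =====
-- stated objective: alternative
-- what changed: B replaces A's bit-by-bit loop (carrying the previous bit through shift/mask/compare) with a closed-form bit trick: m = n ^ (n >> 1) folds every adjacent-bit comparison into one xor, and the test 'm & (m + 1) vanishes' checks in one step that m is all ones; no loop, no per-bit state. Pre_ excludes negative n, outside the puzzle's domain, where A's two's-complement shifting always yields False while B's xor of infinite sign bits can make m all ones - both values are accidents of the representation, agreeing on some negatives and differing on others.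
-- outside the precondition, e.g. on hasAlternatingBits2(-1): A returns False, B returns True; on hasAlternatingBits2(-5): A returns False, B returns False
import Mathlib
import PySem

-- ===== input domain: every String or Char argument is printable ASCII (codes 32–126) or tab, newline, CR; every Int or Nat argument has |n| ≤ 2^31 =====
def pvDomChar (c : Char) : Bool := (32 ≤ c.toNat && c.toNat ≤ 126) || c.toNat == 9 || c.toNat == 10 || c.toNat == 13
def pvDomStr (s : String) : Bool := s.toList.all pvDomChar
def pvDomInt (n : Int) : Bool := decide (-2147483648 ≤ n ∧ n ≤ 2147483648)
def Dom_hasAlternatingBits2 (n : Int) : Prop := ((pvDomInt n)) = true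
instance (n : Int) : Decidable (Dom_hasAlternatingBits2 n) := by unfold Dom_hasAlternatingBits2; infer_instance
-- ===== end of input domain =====

-- B replaces A's stateful shift-and-mask loop by the closed-form bit trick: with m = n ^ (n >> 1),
-- alternating bits means m is all ones, tested by and-ing m with its successor.
-- Pre_ excludes negative n, outside the puzzle's domain, where A's two's-complement shifting
-- always yields False while B's xor of the infinite sign bits can make m all ones — both
-- values are accidents of the representation.


-- ===== PORT A =====
-- A's while loop on arbitrary-precision ints: tmp carries the previous bit, each round compares
-- it with (n >> 1) & 1 (= mod (floordiv n 2) 2, exact for negative n too) and shifts n right.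
-- The loop terminates for every Int (negatives converge to -1, where two equal 1-bits appear);
-- the fuel argument only makes the recursion structural and is proved sufficient below.
def aLoopF : Nat -> Int -> Int -> Bool
  | 0, _, _ => true
  | fuel + 1, tmp, n =>
    if n = 0 then true
    else
      let t1 := PySem.Int.mod (PySem.Int.floordiv n 2) 2   -- tmp_1 = (n >> 1) & 1
      if tmp = t1 then false
      else aLoopF fuel t1 (PySem.Int.floordiv n 2)         -- tmp = tmp_1; n = n >> 1

def hasAlternatingBits2 (n : Int) : Bool :=
  aLoopF (2 * n.natAbs + 2) (PySem.Int.mod n 2) n          -- tmp = n & 1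

-- ===== PORT B =====
-- m = n ^ (n >> 1); return m & (m + 1) == 0
def hasAlternatingBits2_alt (n : Int) : Bool :=
  let m := PySem.Int.bxor n (n >>> (1 : Nat))
  decide (PySem.Int.band m (m + 1) = 0)

-- ===== PRECONDITION & SPEC =====
-- Pre_ excludes negative n (outside the puzzle's domain): there A's two's-complement view always
-- returns False while B's xor of the infinite sign bits can make m all ones — both are accidents
-- of the representation and neither value is specified.
def Pre_hasAlternatingBits2 (n : Int) : Prop := 0 ≤ n
instance (n : Int) : Decidable (Pre_hasAlternatingBits2 n) := by unfold Pre_hasAlternatingBits2; infer_instance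
def pvWitness_hasAlternatingBits2 : Int := (10)

def Spec_hasAlternatingBits2 (n : Int) (out : Bool) : Prop := out = hasAlternatingBits2_alt n
instance (n : Int) (out : Bool) : Decidable (Spec_hasAlternatingBits2 n out) := by unfold Spec_hasAlternatingBits2; infer_instance

-- ===== CLAIM (what is proved, stated in full; the proofs are below) =====
def Claim_equal_hasAlternatingBits2 : Prop := ∀ (n : Int), Dom_hasAlternatingBits2 n → Pre_hasAlternatingBits2 n → Spec_hasAlternatingBits2 n (hasAlternatingBits2 n)

-- ===== LEMMAS AND PROOFS =====

-- A's loop on a Nat argument (cast into Int) is this pure-Nat recursion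
def aLoop (tmp n : Nat) : Bool :=
  if h : n = 0 then true
  else
    let tmp1 := (n / 2) % 2
    if tmp = tmp1 then false
    else aLoop tmp1 (n / 2)
  termination_by n
  decreasing_by exact Nat.div_lt_self (Nat.pos_of_ne_zero h) (by omega)

theorem aLoopF_natCast (fuel : Nat) : ∀ (t m : Nat), m < fuel →
    aLoopF fuel (t : Int) (m : Int) = aLoop t m := by
  induction fuel with
  | zero => intro t m h; omega
  | succ fuel ih =>
    intro t m h
    rw [aLoopF, aLoop]
    by_cases h0 : m = 0
    · simp [h0]
    · rw [if_neg (by exact_mod_cast h0), dif_neg h0]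
      have hfd : PySem.Int.floordiv (m : Int) 2 = ((m / 2 : Nat) : Int) := by
        exact_mod_cast PySem.Int.floordiv_natCast m 2
      have hmod : PySem.Int.mod ((m / 2 : Nat) : Int) 2 = ((m / 2 % 2 : Nat) : Int) := by
        exact_mod_cast PySem.Int.mod_natCast (m / 2) 2
      simp only [hfd, hmod]
      by_cases ht : t = m / 2 % 2
      · simp [ht]
      · rw [if_neg (by exact_mod_cast ht), if_neg ht]
        exact ih _ (m / 2) (by omega)

-- one halving step of xor: bit 0 and the rest
theorem xor_half (a b : Nat) : a ^^^ b = 2 * (a / 2 ^^^ b / 2) + (a % 2 ^^^ b % 2) := by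
  apply Nat.eq_of_testBit_eq
  intro i
  cases i with
  | zero => simp [Nat.testBit_zero]
  | succ i =>
    simp only [Nat.testBit_succ, Nat.xor_div_two]
    have hlt : a % 2 ^^^ b % 2 < 2 := by
      have ha := Nat.mod_lt a (by norm_num : (0:Nat) < 2)
      have hb := Nat.mod_lt b (by norm_num : (0:Nat) < 2)
      interval_cases h1 : a % 2 <;> interval_cases h2 : b % 2 <;> decide
    have h2 : (2 * (a / 2 ^^^ b / 2) + (a % 2 ^^^ b % 2)) / 2 = a / 2 ^^^ b / 2 := by omega
    rw [h2]

theorem land_even (y : Nat) : (2 * y) &&& (2 * y + 1) = 2 * y := by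
  apply Nat.eq_of_testBit_eq; intro i
  cases i with
  | zero => simp [Nat.testBit_zero]
  | succ i =>
    simp only [Nat.testBit_succ, Nat.and_div_two]
    have h1 : 2 * y / 2 = y := by omega
    have h2 : (2 * y + 1) / 2 = y := by omega
    rw [h1, h2, Nat.and_self]

theorem land_odd (y : Nat) : (2 * y + 1) &&& (2 * y + 2) = 2 * (y &&& (y + 1)) := by
  apply Nat.eq_of_testBit_eq; intro i
  cases i with
  | zero => simp [Nat.testBit_zero]
  | succ i =>
    simp only [Nat.testBit_succ, Nat.and_div_two]
    have h1 : (2 * y + 1) / 2 = y := by omega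
    have h2 : (2 * y + 2) / 2 = y + 1 := by omega
    have h3 : 2 * (y &&& (y + 1)) / 2 = y &&& (y + 1) := by omega
    rw [h1, h2, h3]

theorem xor_half_ne_zero (n : Nat) (h : n ≠ 0) : n ^^^ n / 2 ≠ 0 := by
  intro hx
  have := Nat.xor_eq_zero_iff.mp hx
  omega

-- A's loop equals the closed-form all-ones test on n ^^^ n/2
theorem aLoop_eq_trick (n : Nat) :
    aLoop (n % 2) n = decide ((n ^^^ n / 2) &&& ((n ^^^ n / 2) + 1) = 0) := by
  induction n using Nat.strong_induction_on with
  | _ n ih =>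
    rw [aLoop]
    by_cases h0 : n = 0
    · simp [h0]
    · rw [dif_neg h0]
      rw [show n ^^^ n / 2 = 2 * (n / 2 ^^^ n / 2 / 2) + (n % 2 ^^^ n / 2 % 2) from xor_half n (n / 2)]
      by_cases heq : n % 2 = n / 2 % 2
      · rw [if_pos heq]
        rw [show n % 2 ^^^ n / 2 % 2 = 0 from by rw [heq, Nat.xor_self]]
        have hg : n / 2 ^^^ n / 2 / 2 ≠ 0 := by
          apply xor_half_ne_zero
          omega
        simp [land_even]
        omega
      · rw [if_neg heq]
        have hone : n % 2 ^^^ n / 2 % 2 = 1 := by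
          have ha := Nat.mod_lt n (by norm_num : (0:Nat) < 2)
          have hb := Nat.mod_lt (n / 2) (by norm_num : (0:Nat) < 2)
          interval_cases h1 : n % 2 <;> interval_cases h2 : n / 2 % 2 <;> simp_all
        rw [hone]
        have ihh := ih (n / 2) (Nat.div_lt_self (Nat.pos_of_ne_zero h0) (by omega))
        rw [ihh]
        rw [show 2 * (n / 2 ^^^ n / 2 / 2) + 1 + 1 = 2 * (n / 2 ^^^ n / 2 / 2) + 2 from by ring]
        rw [land_odd]
        simp

theorem shiftRight_one_natCast (m : Nat) : ((m : Int) >>> (1 : Nat)) = ((m / 2 : Nat) : Int) := by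
  have h : ShiftRight.shiftRight m 1 = m / 2 := by
    show m >>> 1 = m / 2
    rw [Nat.shiftRight_one]
  simp [HShiftRight.hShiftRight, Int.shiftRight, h]

-- ===== VERDICT (by name: the statement is the Claim_ definition above) =====
theorem hasAlternatingBits2_spec : Claim_equal_hasAlternatingBits2 := by
  intro n _ hpre
  have hp : (0:Int) ≤ n := hpre
  obtain ⟨m, rfl⟩ : ∃ m : Nat, n = (m : Int) := ⟨n.toNat, by omega⟩
  unfold Spec_hasAlternatingBits2 hasAlternatingBits2 hasAlternatingBits2_alt
  rw [show ((m : Int)).natAbs = m from Int.natAbs_natCast m]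
  rw [show PySem.Int.mod ((m : Nat) : Int) 2 = ((m % 2 : Nat) : Int) from by
    exact_mod_cast PySem.Int.mod_natCast m 2]
  rw [aLoopF_natCast (2 * m + 2) (m % 2) m (by omega), aLoop_eq_trick]
  rw [shiftRight_one_natCast]
  simp only [PySem.Int.bxor_natCast]
  rw [show ((m ^^^ m / 2 : Nat) : Int) + 1 = (((m ^^^ m / 2) + 1 : Nat) : Int) from by push_cast; ring]
  simp only [PySem.Int.band_natCast]
  simp
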